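-- pv_equiv track=rewrite | github.com/terrence-giggy/speculum-principum | src/agents/specialist_agents/intelligence_analyst.py | _extract_analysis_sections
-- ===== SOURCE A (Python) =====
-- from typing import Any, Dict, List, Optional
--
-- def _extract_analysis_sections(content: str) -> Dict[str, str]:
--     """Extract structured sections from AI analysis."""
--     sections = {}
--     current_section = None
--     current_content = []
--
--     lines = content.split('\n')
--
--     section_headers = {
--         'executive summary': 'executive_summary',
--         'threat assessment': 'threat_assessment',
--         'risk evaluation': 'risk_evaluation',
--         'strategic implications': 'strategic_implications',
--         'key findings': 'key_findings',
--         'recommendations': 'recommendations',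
--         'confidence assessment': 'confidence_assessment'
--     }
--
--     for line in lines:
--         line_lower = line.lower().strip()
--
--         # Check if this line is a section header
--         found_section = None
--         for header, key in section_headers.items():
--             if header in line_lower and ('**' in line or '#' in line or line_lower.startswith(header)):
--                 found_section = key
--                 break
--
--         if found_section:
--             # Save previous section
--             if current_section:
--                 sections[current_section] = '\n'.join(current_content).strip()
--
--             # Start new section
--             current_section = found_section
--             current_content = []
--         else:
--             # Add content to current section
--             if current_section:
--                 current_content.append(line)
--
--     # Save final section
--     if current_section:
--         sections[current_section] = '\n'.join(current_content).strip()
--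
--     return sections
-- ===== SOURCE B (Python) =====
-- def _extract_analysis_sections(content: str):
--     """Two-pass re-implementation: first locate all header lines, then build each
--     section from the slice of lines between consecutive headers."""
--     lines = content.split('\n')
--
--     section_headers = {
--         'executive summary': 'executive_summary',
--         'threat assessment': 'threat_assessment',
--         'risk evaluation': 'risk_evaluation',
--         'strategic implications': 'strategic_implications',
--         'key findings': 'key_findings',
--         'recommendations': 'recommendations',
--         'confidence assessment': 'confidence_assessment'
--     }
--
--     def header_key(line):
--         line_lower = line.lower().strip()
--         for header, key in section_headers.items():
--             if header in line_lower and ('**' in line or '#' in line or line_lower.startswith(header)):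
--                 return key
--         return None
--
--     marks = [(i, k) for i, k in enumerate(map(header_key, lines)) if k is not None]
--
--     sections = {}
--     for pos, (i, key) in enumerate(marks):
--         end = marks[pos + 1][0] if pos + 1 < len(marks) else len(lines)
--         sections[key] = '\n'.join(lines[i + 1:end]).strip()
--     return sections
-- ===== Notes on version B (the rewrite author's own statement) =====
-- stated objective: alternative
-- what changed: Replaced A's single stateful scan (current-section accumulator saved on each new header) by a two-pass decomposition: first collect the (index, key) of every header line, then build each section directly from the slice of lines between consecutive headers.
import Mathlib
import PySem

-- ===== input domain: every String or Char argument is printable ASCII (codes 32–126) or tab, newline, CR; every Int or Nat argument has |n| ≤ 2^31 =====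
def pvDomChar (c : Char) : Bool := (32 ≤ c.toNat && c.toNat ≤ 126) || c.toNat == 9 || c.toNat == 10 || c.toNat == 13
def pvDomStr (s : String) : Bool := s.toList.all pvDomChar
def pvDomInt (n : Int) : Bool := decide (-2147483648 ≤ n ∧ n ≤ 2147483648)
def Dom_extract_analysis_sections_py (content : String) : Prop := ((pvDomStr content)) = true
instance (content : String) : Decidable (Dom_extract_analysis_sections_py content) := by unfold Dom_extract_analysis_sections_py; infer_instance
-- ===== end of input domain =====

-- B replaces A's stateful single scan by a two-pass decomposition (collect header positions, then slice between them); same cost, no speed claim.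

-- ===== PORT A =====
-- the section_headers table (dict iterated in insertion order), shared verbatim by both Pythons
def pvSectionHeaders : List (List Char × String) :=
  [("executive summary".toList, "executive_summary"),
   ("threat assessment".toList, "threat_assessment"),
   ("risk evaluation".toList, "risk_evaluation"),
   ("strategic implications".toList, "strategic_implications"),
   ("key findings".toList, "key_findings"),
   ("recommendations".toList, "recommendations"),
   ("confidence assessment".toList, "confidence_assessment")]

-- the inner 'for header, key in section_headers.items(): … break' loop (identical predicate in A and in Source B's header_key)
def pvFindKey : List (List Char × String) → List Char → List Char → Option String
  | [], _, _ => none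
  | (header, key) :: t, line, line_lower =>
      if PySem.Chars.isIn header line_lower &&
         (PySem.Chars.isIn "**".toList line || PySem.Chars.isIn "#".toList line ||
          PySem.Chars.startswith line_lower header)
      then some key else pvFindKey t line line_lower

-- line.lower().strip() then the table scan (A's per-line header test; Source B's header_key)
def pvHeaderKey (line : List Char) : Option String :=
  pvFindKey pvSectionHeaders line (PySem.Chars.strip (PySem.Chars.lower line))

-- '\n'.join(parts).strip()
def pvJoinStrip (parts : List (List Char)) : String :=
  String.ofList (PySem.Chars.strip (PySem.Chars.join ['\n'] parts))

-- the body of A's 'for line in lines' loop: state = (sections, current_section, current_content)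
def pvStepA (st : PySem.Dict String String × Option String × List (List Char)) (line : List Char) :
    PySem.Dict String String × Option String × List (List Char) :=
  match pvHeaderKey line with
  | some k =>
      ((match st.2.1 with
        | some c => st.1.insert c (pvJoinStrip st.2.2)
        | none => st.1), some k, ([] : List (List Char)))
  | none =>
      (st.1, st.2.1,
       match st.2.1 with
       | some _ => st.2.2 ++ [line]
       | none => st.2.2)

def extract_analysis_sections_py (content : String) : List (String × String) :=
  let lines := PySem.Chars.splitOn content.toList ['\n']
  let st := lines.foldl pvStepA
    ((PySem.Dict.empty : PySem.Dict String String), (none : Option String), ([] : List (List Char)))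
  -- save final section
  (match st.2.1 with
   | some c => st.1.insert c (pvJoinStrip st.2.2)
   | none => st.1).items

-- ===== PORT B =====
def extract_analysis_sections_py_alt (content : String) : List (String × String) :=
  let lines := PySem.Chars.splitOn content.toList ['\n']
  -- marks = [(i, k) for i, k in enumerate(map(header_key, lines)) if k is not None]
  let marks : List (Int × String) :=
    (PySem.List.enumerate (lines.map pvHeaderKey)).filterMap
      (fun p => p.2.map (fun k => (p.1, k)))
  let sections : PySem.Dict String String :=
    (PySem.List.enumerate marks).foldl
      (fun d q =>
        let e : Int :=
          if q.1 + 1 < (marks.length : Int) then (PySem.List.pyGetD marks (q.1 + 1) (0, "")).1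
          else (lines.length : Int)
        d.insert q.2.2 (pvJoinStrip (PySem.List.slice lines (some (q.2.1 + 1)) (some e))))
      PySem.Dict.empty
  sections.items

-- ===== PRECONDITION & SPEC =====
def Spec_extract_analysis_sections_py (content : String) (out : List (String × String)) : Prop := out = extract_analysis_sections_py_alt content
instance (content : String) (out : List (String × String)) : Decidable (Spec_extract_analysis_sections_py content out) := by unfold Spec_extract_analysis_sections_py; infer_instance

-- ===== CLAIM (what is proved, stated in full; the proofs are below) =====
def Claim_equal_extract_analysis_sections_py : Prop := ∀ (content : String), Dom_extract_analysis_sections_py content → Spec_extract_analysis_sections_py content (extract_analysis_sections_py content)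

-- ===== LEMMAS AND PROOFS =====

-- insert one (key, value) pair
theorem pvDropSucc {α : Type} (L : List α) (n : Nat) (l : α) (r : List α)
    (h : L.drop n = l :: r) : L.drop (n + 1) = r := by
  have h2 : (List.drop n L).tail = List.drop (n + 1) L := List.tail_drop
  rw [h] at h2
  simpa using h2.symm

def pvIns (d : PySem.Dict String String) (p : String × String) : PySem.Dict String String :=
  d.insert p.1 p.2

-- the sequence of (key, value) insertions A performs, as a function of the remaining lines
-- and the current section (name, accumulated body lines)
def pvCollect : Option (String × List (List Char)) → List (List Char) → List (String × String)
  | cur, [] =>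
      match cur with
      | some (c, acc) => [(c, pvJoinStrip acc)]
      | none => []
  | cur, l :: ls =>
      match pvHeaderKey l with
      | some k =>
          match cur with
          | some (c, acc) => (c, pvJoinStrip acc) :: pvCollect (some (k, [])) ls
          | none => pvCollect (some (k, [])) ls
      | none => pvCollect (cur.map (fun p => (p.1, p.2 ++ [l]))) ls

-- the same sequence, with the current body given by its start index into the full list L
def pvG (L : List (List Char)) : Option (String × Nat) → Nat → List (List Char) → List (String × String)
  | cur, n, [] =>
      match cur with
      | some (k, j) => [(k, pvJoinStrip ((L.drop j).take (n - j)))]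
      | none => []
  | cur, n, l :: ls =>
      match pvHeaderKey l with
      | some k' =>
          match cur with
          | some (k, j) => (k, pvJoinStrip ((L.drop j).take (n - j))) :: pvG L (some (k', n + 1)) (n + 1) ls
          | none => pvG L (some (k', n + 1)) (n + 1) ls
      | none => pvG L cur (n + 1) ls

-- header positions (with keys) of the lines, starting at offset n
def pvMarksFrom : Nat → List (List Char) → List (Nat × String)
  | _, [] => []
  | n, l :: ls =>
      match pvHeaderKey l with
      | some k => (n, k) :: pvMarksFrom (n + 1) ls
      | none => pvMarksFrom (n + 1) ls

-- the (key, value) sequence read off the mark list: each body ends at the next mark (or at L.length)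
def pvPWE (L : List (List Char)) : Option (String × Nat) → List (Nat × String) → List (String × String)
  | none, [] => []
  | some (k, j), [] => [(k, pvJoinStrip ((L.drop j).take (L.length - j)))]
  | none, (i, k') :: ms => pvPWE L (some (k', i + 1)) ms
  | some (k, j), (i, k') :: ms =>
      (k, pvJoinStrip ((L.drop j).take (i - j))) :: pvPWE L (some (k', i + 1)) ms

def pvSaveA (st : PySem.Dict String String × Option String × List (List Char)) :
    PySem.Dict String String :=
  match st.2.1 with
  | some c => st.1.insert c (pvJoinStrip st.2.2)
  | none => st.1

theorem pvAM (ls : List (List Char)) :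
    ∀ (d : PySem.Dict String String) (cur : Option String) (acc : List (List Char)),
    pvSaveA (ls.foldl pvStepA (d, cur, acc))
    = (pvCollect (cur.map (fun c => (c, acc))) ls).foldl pvIns d := by
  induction ls with
  | nil =>
      intro d cur acc
      cases cur <;> simp [pvSaveA, pvCollect, pvIns]
  | cons l ls ih =>
      intro d cur acc
      rw [List.foldl_cons]
      cases h : pvHeaderKey l with
      | some k =>
          cases cur with
          | none => simp [pvStepA, h, pvCollect, ih]
          | some c => simp [pvStepA, h, pvCollect, ih, pvIns]
      | none =>
          cases cur with
          | none => simp [pvStepA, h, pvCollect, ih]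
          | some c => simp [pvStepA, h, pvCollect, ih]

theorem pvL1 (L : List (List Char)) (ls : List (List Char)) :
    ∀ (n : Nat) (cur : Option (String × Nat)), L.drop n = ls →
    (∀ k j, cur = some (k, j) → j ≤ n) →
    pvCollect (cur.map (fun p => (p.1, (L.drop p.2).take (n - p.2)))) ls = pvG L cur n ls := by
  induction ls with
  | nil =>
      intro n cur _ _
      cases cur with
      | none => simp [pvCollect, pvG]
      | some p => simp [pvCollect, pvG]
  | cons l ls ih =>
      intro n cur hdrop hle
      cases h : pvHeaderKey l with
      | some k =>
          cases cur with
          | none =>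
              simp only [pvCollect, pvG, h, Option.map_none]
              have := ih (n + 1) (some (k, n + 1)) (pvDropSucc L n l ls hdrop) (by simp)
              simpa using this
          | some p =>
              obtain ⟨c, j⟩ := p
              simp only [pvCollect, pvG, h, Option.map_some]
              have := ih (n + 1) (some (k, n + 1)) (pvDropSucc L n l ls hdrop) (by simp)
              simpa using this
      | none =>
          cases cur with
          | none =>
              simp only [pvCollect, pvG, h, Option.map_none]
              have := ih (n + 1) none (pvDropSucc L n l ls hdrop) (by simp)
              simpa using this
          | some p =>
              obtain ⟨c, j⟩ := p
              have hj : j ≤ n := hle c j rfl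
              simp only [pvCollect, pvG, h, Option.map_some]
              have hacc : (L.drop j).take (n - j) ++ [l] = (L.drop j).take (n + 1 - j) := by
                have h0 : (L.drop j).drop (n - j) = l :: ls := by
                  rw [List.drop_drop, show j + (n - j) = n by omega]
                  exact hdrop
                have h1 : (L.drop j)[n - j]? = some l := by
                  have h2 : ((L.drop j).drop (n - j))[0]? = (L.drop j)[n - j + 0]? :=
                    List.getElem?_drop
                  rw [h0] at h2
                  simpa using h2.symm
                rw [show n + 1 - j = (n - j) + 1 by omega, List.take_add_one, h1]
                simp
              have := ih (n + 1) (some (c, j)) (pvDropSucc L n l ls hdrop) (fun k' j' e => by cases e; omega)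
              rw [← this]
              simp [hacc]

theorem pvL2 (L : List (List Char)) (ls : List (List Char)) :
    ∀ (n : Nat) (cur : Option (String × Nat)), L.drop n = ls →
    pvPWE L cur (pvMarksFrom n ls) = pvG L cur n ls := by
  induction ls with
  | nil =>
      intro n cur hdrop
      have hlen : L.length ≤ n := by
        have := List.drop_eq_nil_iff.mp hdrop
        omega
      cases cur with
      | none => simp [pvMarksFrom, pvPWE, pvG]
      | some p =>
          obtain ⟨k, j⟩ := p
          have t1 : (L.drop j).take (L.length - j) = L.drop j :=
            List.take_of_length_le (by simp)
          have t2 : (L.drop j).take (n - j) = L.drop j :=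
            List.take_of_length_le (by simp; omega)
          simp [pvMarksFrom, pvPWE, pvG, t1, t2]
  | cons l ls ih =>
      intro n cur hdrop
      cases h : pvHeaderKey l with
      | some k =>
          cases cur with
          | none =>
              simp only [pvMarksFrom, pvG, h, pvPWE]
              exact ih (n + 1) (some (k, n + 1)) (pvDropSucc L n l ls hdrop)
          | some p =>
              obtain ⟨c, j⟩ := p
              simp only [pvMarksFrom, pvG, h, pvPWE]
              exact congrArg _ (ih (n + 1) (some (k, n + 1)) (pvDropSucc L n l ls hdrop))
      | none =>
          cases cur with
          | none =>
              simp only [pvMarksFrom, pvG, h]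
              exact ih (n + 1) none (pvDropSucc L n l ls hdrop)
          | some p =>
              obtain ⟨c, j⟩ := p
              simp only [pvMarksFrom, pvG, h]
              exact ih (n + 1) (some (c, j)) (pvDropSucc L n l ls hdrop)

theorem pvM1 (ls : List (List Char)) :
    ∀ (n : Nat),
    ((PySem.List.enumerate (ls.map pvHeaderKey) (n : Int)).filterMap
      (fun p => p.2.map (fun k => (p.1, k))))
    = (pvMarksFrom n ls).map (fun q => ((q.1 : Int), q.2)) := by
  induction ls with
  | nil => intro n; simp [pvMarksFrom, PySem.List.enumerate_nil]
  | cons l ls ih =>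
      intro n
      rw [List.map_cons, PySem.List.enumerate_cons]
      cases h : pvHeaderKey l with
      | some k =>
          simp only [List.filterMap_cons, h, Option.map_some, pvMarksFrom, List.map_cons]
          have := ih (n + 1)
          rw [show ((n : Int) + 1) = ((n + 1 : Nat) : Int) by push_cast; ring] at *
          rw [this]
      | none =>
          simp only [List.filterMap_cons, h, Option.map_none, pvMarksFrom]
          have := ih (n + 1)
          rw [show ((n : Int) + 1) = ((n + 1 : Nat) : Int) by push_cast; ring] at *
          rw [this]

theorem pvGetElem {α : Type} (L : List α) (n : Nat) (l : α) (r : List α)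
    (h : L.drop n = l :: r) : L[n]? = some l := by
  have h2 : (L.drop n)[0]? = L[n + 0]? := List.getElem?_drop
  rw [h] at h2
  simpa using h2.symm

theorem pvL4 (L : List (List Char)) :
    ∀ (ms : List (Nat × String)) (p : Nat) (d : PySem.Dict String String),
    (pvMarksFrom 0 L).drop p = ms →
    (PySem.List.enumerate (ms.map (fun q => ((q.1 : Int), q.2))) (p : Int)).foldl
      (fun d q =>
        d.insert q.2.2 (pvJoinStrip (PySem.List.slice L (some (q.2.1 + 1))
          (some (if q.1 + 1 < ((((pvMarksFrom 0 L).map (fun q => ((q.1 : Int), q.2))).length : Int))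
                 then (PySem.List.pyGetD ((pvMarksFrom 0 L).map (fun q => ((q.1 : Int), q.2))) (q.1 + 1) (0, "")).1
                 else (L.length : Int)))))) d
    = (pvPWE L none ms).foldl pvIns d := by
  intro ms
  induction ms with
  | nil => intro p d _; simp [PySem.List.enumerate_nil, pvPWE]
  | cons m ms ih =>
      intro p d hdrop
      obtain ⟨i, k⟩ := m
      have hplen : p < (pvMarksFrom 0 L).length := by
        by_contra hge
        rw [List.drop_eq_nil_of_le (by omega)] at hdrop
        simp at hdrop
      have hdrop' : (pvMarksFrom 0 L).drop (p + 1) = ms := pvDropSucc _ p (i, k) ms hdrop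
      rw [List.map_cons, PySem.List.enumerate_cons, List.foldl_cons]
      have hcast : ((p : Int) + 1) = ((p + 1 : Nat) : Int) := by push_cast; ring
      cases hms : ms with
      | nil =>
          have hlen : (pvMarksFrom 0 L).length = p + 1 := by
            rw [hms] at hdrop'
            have := List.drop_eq_nil_iff.mp hdrop'
            omega
          have hguard : ¬ ((p : Int) + 1 < (((pvMarksFrom 0 L).map (fun q => ((q.1 : Int), q.2))).length : Int)) := by
            rw [List.length_map, hlen]
            push_cast
            omega
          have hslice : PySem.List.slice L (some ((i : Int) + 1)) (some ((L.length : Int)))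
              = (L.drop (i + 1)).take (L.length - (i + 1)) := by
            rw [show ((i : Int) + 1) = ((i + 1 : Nat) : Int) by push_cast; ring]
            exact PySem.List.slice_natCast L (i + 1) L.length
          simp only [List.map_nil, PySem.List.enumerate_nil, List.foldl_nil]
          rw [if_neg hguard]
          simp [pvPWE, pvIns, hslice]
      | cons m' ms' =>
          obtain ⟨i', k'⟩ := m'
          have hdrop'' : (pvMarksFrom 0 L).drop (p + 1) = (i', k') :: ms' := by rw [hdrop', hms]
          have hp1len : p + 1 < (pvMarksFrom 0 L).length := by
            by_contra hge
            rw [List.drop_eq_nil_of_le (by omega)] at hdrop''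
            simp at hdrop''
          have hguard : ((p : Int) + 1 < (((pvMarksFrom 0 L).map (fun q => ((q.1 : Int), q.2))).length : Int)) := by
            rw [List.length_map]
            omega
          have hget : PySem.List.pyGetD ((pvMarksFrom 0 L).map (fun q => ((q.1 : Int), q.2))) ((p : Int) + 1) (0, "")
              = ((i' : Int), k') := by
            rw [hcast, PySem.List.pyGetD_natCast]
            have h9 : (pvMarksFrom 0 L)[p + 1]? = some (i', k') := pvGetElem _ (p + 1) (i', k') ms' hdrop''
            have h10 : ((pvMarksFrom 0 L).map (fun q => ((q.1 : Int), q.2)))[p + 1]? = some ((i' : Int), k') := by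
              rw [List.getElem?_map, h9]
              rfl
            rw [List.getD_eq_getElem?_getD, h10]
            rfl
          have hslice : PySem.List.slice L (some ((i : Int) + 1)) (some ((i' : Int)))
              = (L.drop (i + 1)).take (i' - (i + 1)) := by
            rw [show ((i : Int) + 1) = ((i + 1 : Nat) : Int) by push_cast; ring]
            exact PySem.List.slice_natCast L (i + 1) i'
          have hrec := ih (p + 1)
            (d.insert k (pvJoinStrip ((L.drop (i + 1)).take (i' - (i + 1))))) hdrop'
          rw [hms] at hrec
          have hPWE : pvPWE L none ((i, k) :: (i', k') :: ms')
              = (k, pvJoinStrip ((L.drop (i + 1)).take (i' - (i + 1)))) :: pvPWE L none ((i', k') :: ms') := by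
            simp [pvPWE]
          have hguard2 : (((p + 1 : Nat) : Int) < (((pvMarksFrom 0 L).map (fun q => ((q.1 : Int), q.2))).length : Int)) := by
            rw [← hcast]; exact hguard
          have hget2 : PySem.List.pyGetD ((pvMarksFrom 0 L).map (fun q => ((q.1 : Int), q.2))) ((p + 1 : Nat) : Int) (0, "")
              = ((i' : Int), k') := by
            rw [← hcast]; exact hget
          rw [hPWE, List.foldl_cons]
          simp only [hcast, hguard2, if_true, hget2, hslice, pvIns]
          exact hrec

theorem pvSpec (content : String) :
    extract_analysis_sections_py content = extract_analysis_sections_py_alt content := by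
  have hA : ∀ (L : List (List Char)),
      pvSaveA (L.foldl pvStepA ((PySem.Dict.empty : PySem.Dict String String),
        (none : Option String), ([] : List (List Char))))
      = (pvPWE L none (pvMarksFrom 0 L)).foldl pvIns PySem.Dict.empty := by
    intro L
    have h1 := pvAM L PySem.Dict.empty none []
    have h2 := pvL1 L L 0 none rfl (by intro k j h; cases h)
    have h3 := pvL2 L L 0 none rfl
    simp only [Option.map_none] at h1 h2
    rw [h1, h2, ← h3]
  simp only [extract_analysis_sections_py, extract_analysis_sections_py_alt]
  have hm := pvM1 (PySem.Chars.splitOn content.toList ['\n']) 0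
  rw [Nat.cast_zero] at hm
  simp only [hm]
  have h4 := pvL4 (PySem.Chars.splitOn content.toList ['\n'])
    (pvMarksFrom 0 (PySem.Chars.splitOn content.toList ['\n'])) 0 PySem.Dict.empty rfl
  rw [Nat.cast_zero] at h4
  rw [h4]
  exact congrArg PySem.Dict.items (hA (PySem.Chars.splitOn content.toList ['\n']))

-- ===== VERDICT (by name: the statement is the Claim_ definition above) =====
theorem extract_analysis_sections_py_spec : Claim_equal_extract_analysis_sections_py := by
  intro content _
  show _ = _
  exact pvSpec content
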